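-- pv_equiv track=rewrite | github.com/jsatchwell2906/codingDojo | python/fundamentals/oop/learning_platform_practice/lecture_practice.py | add_evens_after_odds
-- ===== SOURCE A (Python) =====
-- def add_evens_after_odds(data):
--
--     sum = 0
--
--     last_value_is_even = False
--
--     for value in data:
--
--         if value % 2 == 0 and last_value_is_even == True:
--             sum += value
--
--         last_value_is_even = value % 2
--
--     return sum
-- ===== SOURCE B (Python) =====
-- def add_evens_after_odds(data):
--     values = list(data)
--     return _dc(values, 0, len(values))
--
-- def _dc(values, lo, hi):
--     # Divide and conquer: total contribution of adjacent pairs inside values[lo:hi]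
--     # = contributions inside each half + the single pair straddling the midpoint.
--     if hi - lo < 2:
--         return 0
--     mid = (lo + hi) // 2
--     cross = values[mid] if values[mid] % 2 == 0 and values[mid - 1] % 2 == 1 else 0
--     return _dc(values, lo, mid) + _dc(values, mid, hi) + cross
-- ===== Notes on version B (the rewrite author's own statement) =====
-- stated objective: alternative
-- what changed: B replaces A's left-to-right pass carrying a last-parity flag by a divide-and-conquer over index ranges: recurse on the two halves and add the single midpoint-straddling pair's contribution.
import Mathlib
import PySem

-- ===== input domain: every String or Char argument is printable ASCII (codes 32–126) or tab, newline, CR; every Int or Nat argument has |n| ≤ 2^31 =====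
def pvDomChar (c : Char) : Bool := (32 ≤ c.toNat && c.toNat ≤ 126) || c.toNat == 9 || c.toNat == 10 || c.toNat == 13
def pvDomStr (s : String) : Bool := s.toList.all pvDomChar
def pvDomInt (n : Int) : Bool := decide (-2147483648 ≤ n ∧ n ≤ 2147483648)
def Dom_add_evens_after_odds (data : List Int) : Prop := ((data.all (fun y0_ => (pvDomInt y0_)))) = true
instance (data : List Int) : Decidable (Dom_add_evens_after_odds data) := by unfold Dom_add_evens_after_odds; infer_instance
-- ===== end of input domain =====

-- B replaces A's flag-carrying left-to-right pass by a divide-and-conquer over index ranges (objective: alternative).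

-- ===== PORT A =====
-- State: (sum, last_value_is_even). Python's initial False behaves as the integer 0
-- in `last_value_is_even == True` (True == 1), so the flag is modeled as Int 0.
def add_evens_after_odds (data : List Int) : Int :=
  (data.foldl
    (fun st value =>
      ( if PySem.Int.mod value 2 = 0 ∧ st.2 = 1 then st.1 + value else st.1,
        PySem.Int.mod value 2))
    (0, 0)).1

-- ===== PORT B =====
-- _dc: contributions of adjacent pairs inside values[lo:hi]; all index accesses are
-- in range (lo+1 ≤ mid ≤ hi-1 when hi-lo ≥ 2), so values[i] is ported as getD i 0.
-- mid = (lo + hi) // 2 is written inline; cross is the midpoint-straddling pair's contribution.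
def pvDc (values : List Int) (lo hi : Nat) : Int :=
  if hi - lo < 2 then 0
  else
    pvDc values lo ((lo + hi) / 2) + pvDc values ((lo + hi) / 2) hi +
      (if PySem.Int.mod (values.getD ((lo + hi) / 2) 0) 2 = 0 ∧
          PySem.Int.mod (values.getD ((lo + hi) / 2 - 1) 0) 2 = 1
       then values.getD ((lo + hi) / 2) 0 else 0)
termination_by hi - lo
decreasing_by all_goals omega

def add_evens_after_odds_alt (data : List Int) : Int := pvDc data 0 data.length

-- ===== PRECONDITION & SPEC =====
def Spec_add_evens_after_odds (data : List Int) (out : Int) : Prop := out = add_evens_after_odds_alt data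
instance (data : List Int) (out : Int) : Decidable (Spec_add_evens_after_odds data out) := by unfold Spec_add_evens_after_odds; infer_instance

-- ===== CLAIM (what is proved, stated in full; the proofs are below) =====
def Claim_equal_add_evens_after_odds : Prop := ∀ (data : List Int), Dom_add_evens_after_odds data → Spec_add_evens_after_odds data (add_evens_after_odds data)

-- ===== LEMMAS AND PROOFS =====

-- Reference function: total contribution of adjacent pairs of a list.
def pvPairs : List Int → Int
  | a :: b :: rest =>
      (if PySem.Int.mod b 2 = 0 ∧ PySem.Int.mod a 2 = 1 then b else 0) + pvPairs (b :: rest)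
  | _ => 0

-- A's fold, started with flag f and accumulator s, adds pvG f l.
def pvG (f : Int) : List Int → Int
  | [] => 0
  | v :: rest => (if PySem.Int.mod v 2 = 0 ∧ f = 1 then v else 0) + pvG (PySem.Int.mod v 2) rest

theorem pvA_foldl (l : List Int) : ∀ (s f : Int),
    (l.foldl
      (fun st value =>
        ( if PySem.Int.mod value 2 = 0 ∧ st.2 = 1 then st.1 + value else st.1,
          PySem.Int.mod value 2))
      (s, f)).1 = s + pvG f l := by
  induction l with
  | nil => intro s f; simp [pvG]
  | cons v rest ih =>
    intro s f
    simp only [List.foldl_cons, pvG, ih]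
    split_ifs <;> ring

theorem pvPairs_eq_pvG (l : List Int) : ∀ (a : Int),
    pvPairs (a :: l) = pvG (PySem.Int.mod a 2) l := by
  induction l with
  | nil => intro a; simp [pvPairs, pvG]
  | cons b rest ih => intro a; simp only [pvPairs, pvG, ih]

theorem pvPairs_short (l : List Int) (h : l.length < 2) : pvPairs l = 0 := by
  match l, h with
  | [], _ => rfl
  | [a], _ => rfl

def pvCross : Option Int → Option Int → Int
  | some a, some b => if PySem.Int.mod b 2 = 0 ∧ PySem.Int.mod a 2 = 1 then b else 0
  | _, _ => 0

theorem pvPairs_glue (xs ys : List Int) :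
    pvPairs (xs ++ ys) = pvPairs xs + pvPairs ys + pvCross xs.getLast? ys.head? := by
  induction xs with
  | nil => simp [pvPairs, pvCross]
  | cons a xs' ih =>
    cases xs' with
    | nil =>
      cases ys with
      | nil => simp [pvPairs, pvCross]
      | cons b ys' =>
        simp only [List.cons_append, List.nil_append, pvPairs, pvCross,
          List.getLast?_singleton, List.head?_cons]
        ring
    | cons c xs'' =>
      simp only [List.cons_append] at ih ⊢
      simp only [pvPairs, ih, List.getLast?_cons_cons]
      ring

theorem pvSeg_split (values : List Int) (lo mid hi : Nat)
    (hmid1 : lo + 1 ≤ mid) (hmid2 : mid + 1 ≤ hi) (h : hi ≤ values.length) :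
    pvPairs ((values.drop lo).take (mid - lo)) + pvPairs ((values.drop mid).take (hi - mid)) +
      (if PySem.Int.mod (values.getD mid 0) 2 = 0 ∧
          PySem.Int.mod (values.getD (mid - 1) 0) 2 = 1
       then values.getD mid 0 else 0)
      = pvPairs ((values.drop lo).take (hi - lo)) := by
  have hsplit : (values.drop lo).take (hi - lo)
      = (values.drop lo).take (mid - lo) ++ ((values.drop mid).take (hi - mid)) := by
    have : hi - lo = (mid - lo) + (hi - mid) := by omega
    rw [this, List.take_add]
    have hd : lo + (mid - lo) = mid := by omega
    rw [List.drop_drop, hd]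
  rw [hsplit, pvPairs_glue]
  have hlen1 : ((values.drop lo).take (mid - lo)).length = mid - lo := by
    simp only [List.length_take, List.length_drop]; omega
  have hlast : ((values.drop lo).take (mid - lo)).getLast? = some (values.getD (mid - 1) 0) := by
    rw [List.getLast?_eq_getElem?, hlen1]
    rw [List.getElem?_take_of_lt (by omega), List.getElem?_drop]
    have hb : lo + (mid - lo - 1) = mid - 1 := by omega
    rw [hb, List.getElem?_eq_getElem (by omega), List.getD_eq_getElem?_getD,
      List.getElem?_eq_getElem (by omega)]
    rfl
  have hhead : ((values.drop mid).take (hi - mid)).head? = some (values.getD mid 0) := by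
    rw [List.head?_eq_getElem?, List.getElem?_take_of_lt (by omega), List.getElem?_drop]
    rw [Nat.add_zero, List.getElem?_eq_getElem (by omega), List.getD_eq_getElem?_getD,
      List.getElem?_eq_getElem (by omega)]
    rfl
  rw [hlast, hhead]
  simp only [pvCross]

theorem pvDc_eq (values : List Int) (lo hi : Nat) (h : hi ≤ values.length) :
    pvDc values lo hi = pvPairs ((values.drop lo).take (hi - lo)) := by
  rw [pvDc]
  split
  · rw [pvPairs_short]
    simp only [List.length_take, List.length_drop]
    omega
  · rename_i hge
    rw [pvDc_eq values lo ((lo + hi) / 2) (by omega), pvDc_eq values ((lo + hi) / 2) hi h]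
    exact pvSeg_split values lo ((lo + hi) / 2) hi (by omega) (by omega) h
termination_by hi - lo
decreasing_by all_goals omega

-- ===== VERDICT (by name: the statement is the Claim_ definition above) =====
theorem add_evens_after_odds_spec : Claim_equal_add_evens_after_odds := by
  intro data _
  unfold Spec_add_evens_after_odds add_evens_after_odds add_evens_after_odds_alt
  rw [pvDc_eq data 0 data.length (le_refl _)]
  simp only [List.drop_zero, Nat.sub_zero, List.take_length]
  cases data with
  | nil => rfl
  | cons a rest =>
    simp only [List.foldl_cons, pvA_foldl, pvPairs_eq_pvG]
    simp [PySem.Int.mod]
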